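-- pv_equiv track=rewrite | github.com/yuewang-cuhk/TAKG | pred_evaluate.py | separate_present_absent_by_segmenter
-- ===== SOURCE A (Python) =====
-- def separate_present_absent_by_segmenter(keyphrase_token_2dlist, segmenter):
--     present_keyphrase_token2dlist = []
--     absent_keyphrase_token2dlist = []
--     absent_flag = False
--     for keyphrase_token_list in keyphrase_token_2dlist:
--         if keyphrase_token_list[0] == segmenter:
--             absent_flag = True
--             # skip the segmenter token, because it should not be included in the evaluation
--             continue
--         if absent_flag:
--             absent_keyphrase_token2dlist.append(keyphrase_token_list)
--         else:
--             present_keyphrase_token2dlist.append(keyphrase_token_list)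
--     return present_keyphrase_token2dlist, absent_keyphrase_token2dlist
-- ===== SOURCE B (Python) =====
-- def separate_present_absent_by_segmenter(keyphrase_token_2dlist, segmenter):
--     first = next((i for i, kp in enumerate(keyphrase_token_2dlist) if kp[:1] == [segmenter]), None)
--     if first is None:
--         return list(keyphrase_token_2dlist), []
--     present = keyphrase_token_2dlist[:first]
--     absent = [kp for kp in keyphrase_token_2dlist[first + 1:] if kp[:1] != [segmenter]]
--     return present, absent
-- ===== Notes on version B (the rewrite author's own statement) =====
-- stated objective: alternative
-- what changed: Replaces the single stateful loop with a boolean flag by locating the first segmenter index, then slicing the prefix as present and filtering later segmenter lists out of the suffix as absent.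
import Mathlib
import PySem

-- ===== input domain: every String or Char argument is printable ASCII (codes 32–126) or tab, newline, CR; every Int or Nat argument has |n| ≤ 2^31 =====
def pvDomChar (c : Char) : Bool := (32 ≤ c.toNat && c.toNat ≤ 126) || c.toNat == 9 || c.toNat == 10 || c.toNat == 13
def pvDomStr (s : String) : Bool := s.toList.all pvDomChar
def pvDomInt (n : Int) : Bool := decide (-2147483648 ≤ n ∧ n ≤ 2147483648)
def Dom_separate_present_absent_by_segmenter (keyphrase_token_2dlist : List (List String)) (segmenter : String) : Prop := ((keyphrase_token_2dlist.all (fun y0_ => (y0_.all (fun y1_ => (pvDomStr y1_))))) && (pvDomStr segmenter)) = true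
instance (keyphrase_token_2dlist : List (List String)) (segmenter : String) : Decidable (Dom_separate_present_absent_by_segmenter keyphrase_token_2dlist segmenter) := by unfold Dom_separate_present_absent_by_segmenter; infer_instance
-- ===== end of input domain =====

-- B replaces A's stateful flag loop by: find the first segmenter index, slice the prefix
-- as present, filter later segmenter lists out of the suffix as absent (objective: alternative).

-- ===== PORT A =====
-- A's for-loop with accumulators (present, absent, absent_flag); 'keyphrase_token_list[0]'
-- is PySem.List.pyGet? kp 0 (none = IndexError, excluded by Pre_).
-- the loop body of A's for-loop (shared with the proofs below)
def pvStep (seg : String) (st : List (List String) × List (List String) × Bool) (kp : List String) :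
    List (List String) × List (List String) × Bool :=
  if PySem.List.pyGet? kp 0 == some seg then (st.1, st.2.1, true)
  else if st.2.2 then (st.1, st.2.1 ++ [kp], st.2.2)
  else (st.1 ++ [kp], st.2.1, st.2.2)

def separate_present_absent_by_segmenter (keyphrase_token_2dlist : List (List String)) (segmenter : String) : List (List String) × List (List String) :=
  let st := keyphrase_token_2dlist.foldl (pvStep segmenter) ([], [], false)
  (st.1, st.2.1)

-- ===== PORT B =====
-- B: first segmenter index via findIdx? (Python's next over enumerate); kp[:1] == [segmenter] is kp.take 1 == [segmenter].
def separate_present_absent_by_segmenter_alt (keyphrase_token_2dlist : List (List String)) (segmenter : String) : List (List String) × List (List String) :=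
  match keyphrase_token_2dlist.findIdx? (fun kp => kp.take 1 == [segmenter]) with
  | none => (keyphrase_token_2dlist, [])
  | some i => (keyphrase_token_2dlist.take i,
      (keyphrase_token_2dlist.drop (i + 1)).filter (fun kp => !(kp.take 1 == [segmenter])))

-- ===== PRECONDITION & SPEC =====
-- Pre_ excludes inputs containing an empty keyphrase list: there Python A raises IndexError on kp[0].
def Pre_separate_present_absent_by_segmenter (keyphrase_token_2dlist : List (List String)) (segmenter : String) : Prop :=
  ∀ kp ∈ keyphrase_token_2dlist, kp ≠ []
instance (keyphrase_token_2dlist : List (List String)) (segmenter : String) : Decidable (Pre_separate_present_absent_by_segmenter keyphrase_token_2dlist segmenter) := by unfold Pre_separate_present_absent_by_segmenter; infer_instance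
def pvWitness_separate_present_absent_by_segmenter : List (List String) × String := ([["a"], ["s"], ["b"]], "s")

def Spec_separate_present_absent_by_segmenter (keyphrase_token_2dlist : List (List String)) (segmenter : String) (out : List (List String) × List (List String)) : Prop := out = separate_present_absent_by_segmenter_alt keyphrase_token_2dlist segmenter
instance (keyphrase_token_2dlist : List (List String)) (segmenter : String) (out : List (List String) × List (List String)) : Decidable (Spec_separate_present_absent_by_segmenter keyphrase_token_2dlist segmenter out) := by unfold Spec_separate_present_absent_by_segmenter; infer_instance

-- ===== CLAIM (what is proved, stated in full; the proofs are below) =====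
def Claim_equal_separate_present_absent_by_segmenter : Prop := ∀ (keyphrase_token_2dlist : List (List String)) (segmenter : String), Dom_separate_present_absent_by_segmenter keyphrase_token_2dlist segmenter → Pre_separate_present_absent_by_segmenter keyphrase_token_2dlist segmenter → Spec_separate_present_absent_by_segmenter keyphrase_token_2dlist segmenter (separate_present_absent_by_segmenter keyphrase_token_2dlist segmenter)

-- ===== LEMMAS AND PROOFS =====

-- A's branch test equals B's: kp[0] == seg  ↔  kp[:1] == [seg] (both false only on kp = [],
-- where A would raise; the ports agree there too).
theorem pv_test_eq (kp : List String) (seg : String) :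
    (PySem.List.pyGet? kp 0 == some seg) = (kp.take 1 == [seg]) := by
  cases kp with
  | nil => simp [PySem.List.pyGet?]
  | cons x xs => simp

theorem pv_fold_true (seg : String) (l : List (List String)) :
    ∀ p a, l.foldl (pvStep seg) (p, a, true)
      = (p, a ++ l.filter (fun kp => !(kp.take 1 == [seg])), true) := by
  induction l with
  | nil => simp
  | cons kp rest ih =>
    intro p a
    by_cases h : (kp.take 1 == [seg]) = true
    · simp [pvStep, pv_test_eq, h, ih]
    · simp only [Bool.not_eq_true] at h
      simp [pvStep, pv_test_eq, h, ih]

theorem pv_fold_false (seg : String) (l : List (List String)) :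
    ∀ p a, (((l.foldl (pvStep seg) (p, a, false)).1, (l.foldl (pvStep seg) (p, a, false)).2.1)
      : List (List String) × List (List String))
      = (p ++ (separate_present_absent_by_segmenter_alt l seg).1,
         a ++ (separate_present_absent_by_segmenter_alt l seg).2) := by
  induction l with
  | nil => simp [separate_present_absent_by_segmenter_alt]
  | cons kp rest ih =>
    intro p a
    by_cases h : (kp.take 1 == [seg]) = true
    · have hs : pvStep seg (p, a, false) kp = (p, a, true) := by
        simp [pvStep, pv_test_eq, h]
      rw [List.foldl_cons, hs, pv_fold_true]
      simp [separate_present_absent_by_segmenter_alt, List.findIdx?_cons, h]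
    · simp only [Bool.not_eq_true] at h
      have hs : pvStep seg (p, a, false) kp = (p ++ [kp], a, false) := by
        simp [pvStep, pv_test_eq, h]
      rw [List.foldl_cons, hs, ih (p ++ [kp]) a]
      simp only [separate_present_absent_by_segmenter_alt, List.findIdx?_cons, h]
      cases hf : rest.findIdx? (fun kp => kp.take 1 == [seg]) with
      | none => simp
      | some i => simp [List.take_succ_cons, List.drop_succ_cons]

-- ===== VERDICT (by name: the statement is the Claim_ definition above) =====
theorem separate_present_absent_by_segmenter_spec : Claim_equal_separate_present_absent_by_segmenter := by
  intro l seg _ _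
  show _ = _
  have h := pv_fold_false seg l [] []
  simp only [List.nil_append] at h
  simpa [separate_present_absent_by_segmenter] using h
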